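-- pv_equiv track=rewrite | github.com/eveelinss/genes_detective | modules/tools_for_rna_dna.py | search_first_stop_codon_in_rna
-- ===== SOURCE A (Python) =====
-- def search_first_stop_codon_in_rna(seqs: str, flags: str, seq_number: int) -> str:
--     idx = []
--     if flags == "rna":
--         for cdn in ("uga", "uaa", "uag"):
--             idx_cdn = seqs.lower().find(cdn)
--             if idx_cdn != -1:
--                 idx.append(idx_cdn)
--         if len(idx) != 0:
--             return f"in sequense №{seq_number} the first stop codon starts with the {min(idx) + 1} character"
--         return f"in sequense №{seq_number} no stop codon"
--     elif flags == "dna":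
--         return f"the sequense №{seq_number} is dna"
--     return f"the sequense №{seq_number} is not a nucleic acid"
-- ===== SOURCE B (Python) =====
-- def search_first_stop_codon_in_rna(seqs: str, flags: str, seq_number: int) -> str:
--     if flags == "dna":
--         return f"the sequense №{seq_number} is dna"
--     if flags != "rna":
--         return f"the sequense №{seq_number} is not a nucleic acid"
--     s = seqs.lower()
--     for i in range(len(s) - 2):
--         if s[i:i + 3] in ("uga", "uaa", "uag"):
--             return f"in sequense №{seq_number} the first stop codon starts with the {i + 1} character"
--     return f"in sequense №{seq_number} no stop codon"
-- ===== Notes on version B (the rewrite author's own statement) =====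
-- stated objective: simpler
-- what changed: Instead of running three separate .find() scans and taking the min of the collected hit positions, B lowercases once and makes a single short-circuiting forward pass that returns at the first index whose 3-character window is a stop codon.
import Mathlib
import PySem

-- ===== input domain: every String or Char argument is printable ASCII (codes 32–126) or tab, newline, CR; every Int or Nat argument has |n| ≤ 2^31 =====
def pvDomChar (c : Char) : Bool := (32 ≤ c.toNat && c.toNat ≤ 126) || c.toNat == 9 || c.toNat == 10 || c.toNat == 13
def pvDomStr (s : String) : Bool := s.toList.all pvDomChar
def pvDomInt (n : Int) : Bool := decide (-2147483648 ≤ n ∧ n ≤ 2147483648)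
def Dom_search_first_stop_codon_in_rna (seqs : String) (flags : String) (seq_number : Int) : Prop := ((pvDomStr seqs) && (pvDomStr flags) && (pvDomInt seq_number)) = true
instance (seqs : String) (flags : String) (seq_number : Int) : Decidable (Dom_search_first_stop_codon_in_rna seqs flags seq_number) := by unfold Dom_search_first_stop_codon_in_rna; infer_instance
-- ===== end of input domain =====

-- B replaces A's three full .find scans + min() by one short-circuiting forward window scan; objective: simpler.
-- ===== PORT A =====
def search_first_stop_codon_in_rna (seqs : String) (flags : String) (seq_number : Int) : String :=
  if flags == "rna" then
    let idx : List Int := ["uga", "uaa", "uag"].foldl (fun idx cdn =>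
      let idx_cdn := PySem.Str.find (PySem.Str.lower seqs) cdn
      if idx_cdn != -1 then idx ++ [idx_cdn] else idx) []
    if idx.length ≠ 0 then
      "in sequense №" ++ PySem.Int.toStr seq_number ++ " the first stop codon starts with the " ++
        PySem.Int.toStr ((PySem.List.min? idx id).getD 0 + 1) ++ " character"
    else
      "in sequense №" ++ PySem.Int.toStr seq_number ++ " no stop codon"
  else if flags == "dna" then
    "the sequense №" ++ PySem.Int.toStr seq_number ++ " is dna"
  else
    "the sequense №" ++ PySem.Int.toStr seq_number ++ " is not a nucleic acid"

-- ===== PORT B =====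
def pvCodons : List (List Char) := ["uga".toList, "uaa".toList, "uag".toList]

-- the 'for i in range(len(s)-2)' loop of Source B: first i whose 3-char window is a stop codon
def pvScan (s : List Char) (i : Nat) : Option Nat :=
  if _h : i < s.length - 2 then
    if PySem.List.slice s (some (i : Int)) (some ((i : Int) + 3)) ∈ pvCodons then some i
    else pvScan s (i + 1)
  else none
termination_by s.length - 2 - i

def search_first_stop_codon_in_rna_alt (seqs : String) (flags : String) (seq_number : Int) : String :=
  if flags == "dna" then
    "the sequense №" ++ PySem.Int.toStr seq_number ++ " is dna"
  else if flags != "rna" then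
    "the sequense №" ++ PySem.Int.toStr seq_number ++ " is not a nucleic acid"
  else
    match pvScan (PySem.Chars.lower seqs.toList) 0 with
    | some i =>
      "in sequense №" ++ PySem.Int.toStr seq_number ++ " the first stop codon starts with the " ++
        PySem.Int.toStr ((i : Int) + 1) ++ " character"
    | none =>
      "in sequense №" ++ PySem.Int.toStr seq_number ++ " no stop codon"

-- ===== PRECONDITION & SPEC =====
def Spec_search_first_stop_codon_in_rna (seqs : String) (flags : String) (seq_number : Int) (out : String) : Prop := out = search_first_stop_codon_in_rna_alt seqs flags seq_number
instance (seqs : String) (flags : String) (seq_number : Int) (out : String) : Decidable (Spec_search_first_stop_codon_in_rna seqs flags seq_number out) := by unfold Spec_search_first_stop_codon_in_rna; infer_instance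

-- ===== CLAIM (what is proved, stated in full; the proofs are below) =====
def Claim_equal_search_first_stop_codon_in_rna : Prop := ∀ (seqs : String) (flags : String) (seq_number : Int), Dom_search_first_stop_codon_in_rna seqs flags seq_number → Spec_search_first_stop_codon_in_rna seqs flags seq_number (search_first_stop_codon_in_rna seqs flags seq_number)

-- ===== LEMMAS AND PROOFS =====


-- a stop codon starts at position k of s
def MatchAt (s : List Char) (k : Nat) : Prop := ∃ c ∈ pvCodons, c <+: s.drop k

theorem mem_pvCodons_length {c : List Char} (h : c ∈ pvCodons) : c.length = 3 := by
  fin_cases h <;> rfl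

theorem matchAt_lt {s : List Char} {k : Nat} (h : MatchAt s k) : k < s.length - 2 := by
  obtain ⟨c, hc, hp⟩ := h
  have h1 := hp.length_le
  rw [mem_pvCodons_length hc, List.length_drop] at h1
  omega

theorem take_mem_iff (s : List Char) (i : Nat) :
    (List.take 3 (List.drop i s) ∈ pvCodons) ↔ MatchAt s i := by
  constructor
  · intro h
    exact ⟨_, h, by rw [List.prefix_iff_eq_take, mem_pvCodons_length h]⟩
  · rintro ⟨c, hc, hp⟩
    have := List.prefix_iff_eq_take.mp hp
    rw [mem_pvCodons_length hc] at this
    rw [← this]; exact hc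

theorem slice_mem_iff (s : List Char) (i : Nat) :
    (PySem.List.slice s (some (i : Int)) (some ((i : Int) + 3)) ∈ pvCodons) ↔ MatchAt s i := by
  have h3 : ((i : Int) + 3) = ((i : Int) + ((3 : Nat) : Int)) := by norm_num
  rw [h3, PySem.List.slice_natCast_add, take_mem_iff]

theorem pvScan_eq_none (s : List Char) (n : Nat) : ∀ i, s.length - 2 - i ≤ n →
    (∀ k, i ≤ k → ¬ MatchAt s k) → pvScan s i = none := by
  induction n with
  | zero =>
    intro i hn _
    unfold pvScan
    rw [dif_neg (by omega)]
  | succ n ih =>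
    intro i hn h
    unfold pvScan
    split
    · rw [if_neg (fun hm => h i le_rfl ((slice_mem_iff s i).mp hm))]
      exact ih (i + 1) (by omega) (fun k hk => h k (by omega))
    · rfl

theorem pvScan_eq_some (s : List Char) (n : Nat) : ∀ i j, j - i ≤ n → i ≤ j → MatchAt s j →
    (∀ k, i ≤ k → k < j → ¬ MatchAt s k) → pvScan s i = some j := by
  induction n with
  | zero =>
    intro i j hn hij hm _
    have hi : i = j := by omega
    subst hi
    unfold pvScan
    rw [dif_pos (matchAt_lt hm), if_pos ((slice_mem_iff s i).mpr hm)]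
  | succ n ih =>
    intro i j hn hij hm hmin
    by_cases hij' : i = j
    · subst hij'
      unfold pvScan
      rw [dif_pos (matchAt_lt hm), if_pos ((slice_mem_iff s i).mpr hm)]
    · unfold pvScan
      have hlt : i < s.length - 2 := by have := matchAt_lt hm; omega
      rw [dif_pos hlt, if_neg (fun hx => hmin i le_rfl (by omega) ((slice_mem_iff s i).mp hx))]
      exact ih (i + 1) j (by omega) (by omega) hm (fun k hk hk' => hmin k (by omega) hk')

-- the string codons of A and the char-list codons of B correspond
theorem toList_mem_pvCodons {cdn : String} (h : cdn ∈ (["uga", "uaa", "uag"] : List String)) :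
    cdn.toList ∈ pvCodons := by
  fin_cases h <;> decide

theorem pvCodons_toList {c : List Char} (h : c ∈ pvCodons) :
    ∃ cdn ∈ (["uga", "uaa", "uag"] : List String), cdn.toList = c := by
  fin_cases h
  · exact ⟨"uga", by decide, rfl⟩
  · exact ⟨"uaa", by decide, rfl⟩
  · exact ⟨"uag", by decide, rfl⟩

-- A's idx accumulation loop is append-if over the codon list
theorem idx_eq (seqs : String) :
    (["uga", "uaa", "uag"] : List String).foldl (fun idx cdn =>
        let idx_cdn := PySem.Str.find (PySem.Str.lower seqs) cdn
        if idx_cdn != -1 then idx ++ [idx_cdn] else idx) [] =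
      ((["uga", "uaa", "uag"] : List String).filter
          (fun cdn => PySem.Str.find (PySem.Str.lower seqs) cdn != -1)).map
        (fun cdn => PySem.Str.find (PySem.Str.lower seqs) cdn) := by
  exact PySem.List.foldl_append_if _ _ _ []

-- core of the rna branch: A's min-of-finds message equals B's first-window message
theorem rna_core (seqs : String) (seq_number : Int) :
    (if (((["uga", "uaa", "uag"] : List String).filter
          (fun cdn => PySem.Str.find (PySem.Str.lower seqs) cdn != -1)).map
        (fun cdn => PySem.Str.find (PySem.Str.lower seqs) cdn)).length ≠ 0 then
      "in sequense №" ++ PySem.Int.toStr seq_number ++ " the first stop codon starts with the " ++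
        PySem.Int.toStr ((PySem.List.min? (((["uga", "uaa", "uag"] : List String).filter
          (fun cdn => PySem.Str.find (PySem.Str.lower seqs) cdn != -1)).map
            (fun cdn => PySem.Str.find (PySem.Str.lower seqs) cdn)) id).getD 0 + 1) ++ " character"
    else
      "in sequense №" ++ PySem.Int.toStr seq_number ++ " no stop codon") =
    (match pvScan (PySem.Chars.lower seqs.toList) 0 with
    | some i =>
      "in sequense №" ++ PySem.Int.toStr seq_number ++ " the first stop codon starts with the " ++
        PySem.Int.toStr ((i : Int) + 1) ++ " character"
    | none =>
      "in sequense №" ++ PySem.Int.toStr seq_number ++ " no stop codon") := by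
  set s : List Char := PySem.Chars.lower seqs.toList with hs
  have hF : ∀ cdn : String, PySem.Str.find (PySem.Str.lower seqs) cdn =
      PySem.Chars.find s cdn.toList := by
    intro cdn; rw [PySem.Str.find_eq, PySem.Str.toList_lower]
  set idx : List Int := ((["uga", "uaa", "uag"] : List String).filter
      (fun cdn => PySem.Str.find (PySem.Str.lower seqs) cdn != -1)).map
        (fun cdn => PySem.Str.find (PySem.Str.lower seqs) cdn) with hidx
  have hmem : ∀ x : Int, x ∈ idx ↔ ∃ cdn ∈ (["uga", "uaa", "uag"] : List String),
      PySem.Chars.find s cdn.toList = x ∧ x ≠ -1 := by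
    intro x
    simp only [hidx, List.mem_map, List.mem_filter, hF, bne_iff_ne, ne_eq]
    constructor
    · rintro ⟨cdn, ⟨hc, hne⟩, rfl⟩; exact ⟨cdn, hc, rfl, by simpa using hne⟩
    · rintro ⟨cdn, hc, rfl, hne⟩; exact ⟨cdn, ⟨hc, by simpa using hne⟩, rfl⟩
  -- any match position has a find that lands at or before it
  have hmatch : ∀ k, MatchAt s k → ∃ x ∈ idx, 0 ≤ x ∧ x.toNat ≤ k := by
    intro k hm
    obtain ⟨c, hc, hp⟩ := hm
    obtain ⟨cdn, hcdn, rfl⟩ := pvCodons_toList hc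
    have hinf : cdn.toList <:+: s :=
      (PySem.Chars.isIn_iff_infix _ _).mp
        ((PySem.Chars.exists_prefix_drop_iff_isIn _ _).mp ⟨k, hp⟩)
    have hpos : 0 ≤ PySem.Chars.find s cdn.toList :=
      (PySem.Chars.find_nonneg_iff _ _).mpr hinf
    refine ⟨PySem.Chars.find s cdn.toList, (hmem _).mpr ⟨cdn, hcdn, rfl, by omega⟩, hpos, ?_⟩
    by_contra hk
    exact (PySem.Chars.find_spec hpos).2 k (by omega) hp
  cases hmin : PySem.List.min? idx id with
  | none =>
    have hnil : idx = [] := (PySem.List.min?_eq_none_iff idx id).mp hmin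
    rw [if_neg (by simp [hnil])]
    have hscan : pvScan s 0 = none := by
      apply pvScan_eq_none s (s.length - 2) 0 (by omega)
      intro k _ hm
      obtain ⟨x, hx, -, -⟩ := hmatch k hm
      simp [hnil] at hx
    rw [hscan]
  | some m =>
    have hmm : m ∈ idx := PySem.List.min?_mem hmin
    have hnil : idx ≠ [] := fun h => by simp [h] at hmm
    rw [if_pos (by simpa using fun h => hnil (List.eq_nil_of_length_eq_zero h))]
    obtain ⟨cdn, hcdn, hfind, hne⟩ := (hmem m).mp hmm
    have hpos : 0 ≤ m := by
      have := PySem.Chars.neg_one_le_find s cdn.toList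
      omega
    have hmatchm : MatchAt s m.toNat := by
      refine ⟨cdn.toList, toList_mem_pvCodons hcdn, ?_⟩
      have := (PySem.Chars.find_spec (s := s) (sub := cdn.toList) (by omega)).1
      rwa [hfind] at this
    have hscan : pvScan s 0 = some m.toNat := by
      apply pvScan_eq_some s m.toNat 0 m.toNat (by omega) (by omega) hmatchm
      intro k _ hk hm'
      obtain ⟨x, hx, hx0, hxk⟩ := hmatch k hm'
      have := PySem.List.min?_isMin hmin x hx
      simp only [id] at this
      omega
    rw [hscan]
    simp [Int.toNat_of_nonneg hpos]

-- ===== VERDICT (by name: the statement is the Claim_ definition above) =====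
theorem search_first_stop_codon_in_rna_spec : Claim_equal_search_first_stop_codon_in_rna := by
  intro seqs flags seq_number _
  unfold Spec_search_first_stop_codon_in_rna
  unfold search_first_stop_codon_in_rna search_first_stop_codon_in_rna_alt
  by_cases h1 : flags = "rna"
  · subst h1
    have hd : (("rna" : String) == "dna") = false := by decide
    have hr : (("rna" : String) != "rna") = false := by decide
    simp only [beq_self_eq_true, if_true, hd, hr, Bool.false_eq_true, if_false, idx_eq]
    exact rna_core seqs seq_number
  · by_cases h2 : flags = "dna"
    · subst h2
      have h : (("dna" : String) == "rna") = false := by decide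
      simp only [h, Bool.false_eq_true, if_false, beq_self_eq_true, if_true]
    · have ha : (flags == "rna") = false := by simp [h1]
      have hb : (flags == "dna") = false := by simp [h2]
      have hc : (flags != "rna") = true := by simp [h1]
      simp only [ha, hb, hc, Bool.false_eq_true, if_false, if_true]
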